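-- pv_equiv track=rewrite | github.com/matheusfsa/marioai | competition/_analyze_investigation.py | _time_left_spread
-- ===== SOURCE A (Python) =====
-- from collections import defaultdict
--
-- def _time_left_spread(rows: list[dict[str, str]]) -> str:
--     lines = ['| Fase | min | max | n distintos | valores únicos (top 5) |', '|---|---:|---:|---:|---|']
--     by_phase: dict[str, list[int]] = defaultdict(list)
--     for r in rows:
--         if r['agent'] == 'RandomAgent' and int(r['status']) == 1:
--             by_phase[r['phase']].append(int(r['time_left']))
--     for phase in sorted(by_phase):
--         vals = by_phase[phase]
--         uniq = sorted(set(vals))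
--         lines.append(
--             f'| {phase} | {min(vals)} | {max(vals)} | {len(uniq)} | {", ".join(str(v) for v in uniq[:5])} |'
--         )
--     return '\n'.join(lines) if len(lines) > 2 else '_RandomAgent não venceu nenhuma fase — impossível medir._'
-- ===== SOURCE B (Python) =====
-- def _time_left_spread(rows: list[dict[str, str]]) -> str:
--     # flat pass: keep (phase, time_left) for winning RandomAgent rows, then sort by phase
--     pairs = sorted(
--         ((r['phase'], int(r['time_left'])) for r in rows
--          if r['agent'] == 'RandomAgent' and int(r['status']) == 1),
--         key=lambda p: p[0])
--     body = []
--     i = 0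
--     while i < len(pairs):
--         phase = pairs[i][0]
--         j = i
--         while j < len(pairs) and pairs[j][0] == phase:
--             j += 1
--         vals = [v for _, v in pairs[i:j]]
--         uniq = sorted(set(vals))
--         body.append(
--             f'| {phase} | {min(vals)} | {max(vals)} | {len(uniq)} | {", ".join(str(v) for v in uniq[:5])} |'
--         )
--         i = j
--     if not body:
--         return '_RandomAgent não venceu nenhuma fase — impossível medir._'
--     return '\n'.join(
--         ['| Fase | min | max | n distintos | valores únicos (top 5) |', '|---|---:|---:|---:|---|'] + body)
-- ===== Notes on version B (the rewrite author's own statement) =====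
-- stated objective: alternative
-- what changed: A groups rows into a defaultdict keyed by phase and then walks its sorted keys with per-key lookups; B builds one flat filtered (phase, time_left) list, stable-sorts it by phase and emits a line per contiguous run in a single sweep, with no dict at all.
import Mathlib
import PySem

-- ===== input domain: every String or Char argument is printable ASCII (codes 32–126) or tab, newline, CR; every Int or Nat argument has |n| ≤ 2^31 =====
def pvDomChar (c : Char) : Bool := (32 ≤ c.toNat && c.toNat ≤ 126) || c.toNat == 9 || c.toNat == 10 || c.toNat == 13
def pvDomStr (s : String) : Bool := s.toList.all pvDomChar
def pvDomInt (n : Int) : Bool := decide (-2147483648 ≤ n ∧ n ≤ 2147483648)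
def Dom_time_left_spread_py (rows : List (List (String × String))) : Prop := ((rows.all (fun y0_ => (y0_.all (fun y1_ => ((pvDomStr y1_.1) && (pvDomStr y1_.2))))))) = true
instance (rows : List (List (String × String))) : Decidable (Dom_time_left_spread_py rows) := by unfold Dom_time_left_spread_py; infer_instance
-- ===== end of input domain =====

-- B replaces A's defaultdict-then-sorted-keys grouping by one flat filtered (phase, time_left) list that is
-- stable-sorted by phase and swept once, emitting a table line per contiguous run (objective: alternative).
-- Shared helpers (both Pythons contain these identical subexpressions):

-- r['agent'] == 'RandomAgent' and int(r['status']) == 1  (lookups that would raise are excluded by Pre_)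
def pvGuard (r : List (String × String)) : Bool :=
  ((PySem.Dict.mk r).getD "agent" "" == "RandomAgent") &&
    ((PySem.Int.ofStr? ((PySem.Dict.mk r).getD "status" "")).getD 0 == 1)

def pvPhase (r : List (String × String)) : String := (PySem.Dict.mk r).getD "phase" ""

def pvTimeLeft (r : List (String × String)) : Int :=
  (PySem.Int.ofStr? ((PySem.Dict.mk r).getD "time_left" "")).getD 0

def pvHeader1 : String := "| Fase | min | max | n distintos | valores únicos (top 5) |"
def pvHeader2 : String := "|---|---:|---:|---:|---|"
def pvSentinel : String := "_RandomAgent não venceu nenhuma fase — impossível medir._"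

-- the f-string line for one phase; vals is nonempty at every call site, so the .getD 0 defaults are never taken
def pvLine (phase : String) (vals : List Int) : String :=
  let uniq := PySem.List.sorted (PySem.Set.ofList vals) (fun v => v)
  "| " ++ phase ++ " | " ++ PySem.Int.toStr ((PySem.List.min? vals (fun v => v)).getD 0) ++
    " | " ++ PySem.Int.toStr ((PySem.List.max? vals (fun v => v)).getD 0) ++
    " | " ++ PySem.Int.toStr (PySem.List.len uniq) ++
    " | " ++ PySem.Str.join ", " ((PySem.List.slice uniq none (some 5)).map PySem.Int.toStr) ++ " |"

-- ===== PORT A =====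
def time_left_spread_py (rows : List (List (String × String))) : String :=
  let header : List String := [pvHeader1, pvHeader2]
  let byPhase : PySem.Dict String (List Int) :=
    rows.foldl
      (fun d r => if pvGuard r then d.modify (pvPhase r) [] (fun vs => vs ++ [pvTimeLeft r]) else d)
      PySem.Dict.empty
  let lines : List String :=
    (PySem.List.sorted byPhase.keys (fun k => k)).foldl
      (fun acc phase => acc ++ [pvLine phase (byPhase.getD phase [])]) header
  if 2 < PySem.List.len lines then PySem.Str.join "\n" lines else pvSentinel

-- ===== PORT B =====
-- the inner while loop of Source B: take the contiguous run of the front phase, recurse on the rest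
def pvRuns : List (String × Int) → List (String × List Int)
  | [] => []
  | (p, v) :: rest =>
      (p, v :: (rest.takeWhile (fun q => q.1 == p)).map (fun q => q.2)) ::
        pvRuns (rest.dropWhile (fun q => q.1 == p))
termination_by l => l.length
decreasing_by
  simp only [List.length_cons]
  exact Nat.lt_succ_of_le (List.length_dropWhile_le _ _)

def time_left_spread_py_alt (rows : List (List (String × String))) : String :=
  let pairs : List (String × Int) :=
    PySem.List.sorted
      (rows.foldl (fun acc r => if pvGuard r then acc ++ [(pvPhase r, pvTimeLeft r)] else acc) [])
      (fun p => p.1)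
  let body : List String := (pvRuns pairs).map (fun g => pvLine g.1 g.2)
  if body.isEmpty then pvSentinel
  else PySem.Str.join "\n" (pvHeader1 :: pvHeader2 :: body)

-- ===== PRECONDITION & SPEC =====
-- Pre_ excludes exactly the rows where Python A raises: a missing 'agent' key (KeyError); for rows whose
-- agent is 'RandomAgent', a missing or non-int 'status' (KeyError/ValueError); and for winning RandomAgent
-- rows, a missing 'phase' or a missing/non-int 'time_left'.
def pvRowOK (r : List (String × String)) : Bool :=
  match (PySem.Dict.mk r).get? "agent" with
  | none => false
  | some a =>
    if a == "RandomAgent" then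
      match (PySem.Dict.mk r).get? "status" with
      | none => false
      | some s =>
        match PySem.Int.ofStr? s with
        | none => false
        | some st =>
          if st == 1 then
            ((PySem.Dict.mk r).get? "phase").isSome &&
              (match (PySem.Dict.mk r).get? "time_left" with
               | none => false
               | some t => (PySem.Int.ofStr? t).isSome)
          else true
    else true

def Pre_time_left_spread_py (rows : List (List (String × String))) : Prop :=
  rows.all pvRowOK = true

instance (rows : List (List (String × String))) : Decidable (Pre_time_left_spread_py rows) := by
  unfold Pre_time_left_spread_py; infer_instance

def pvWitness_time_left_spread_py : (List (List (String × String))) :=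
  [[("agent", "RandomAgent"), ("status", "1"), ("phase", "1-1"), ("time_left", "42")],
   [("agent", "Astar"), ("status", "0")]]

def Spec_time_left_spread_py (rows : List (List (String × String))) (out : String) : Prop :=
  out = time_left_spread_py_alt rows
instance (rows : List (List (String × String))) (out : String) : Decidable (Spec_time_left_spread_py rows out) := by
  unfold Spec_time_left_spread_py; infer_instance

-- ===== CLAIM (what is proved, stated in full; the proofs are below) =====
def Claim_equal_time_left_spread_py : Prop :=
  ∀ (rows : List (List (String × String))), Dom_time_left_spread_py rows →
    Pre_time_left_spread_py rows → Spec_time_left_spread_py rows (time_left_spread_py rows)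

-- ===== LEMMAS AND PROOFS =====

-- the filtered flat pair list both ports reduce to
def pvPairs (rows : List (List (String × String))) : List (String × Int) :=
  (rows.filter pvGuard).map (fun r => (pvPhase r, pvTimeLeft r))

-- the common normal form of both ports
def pvRender (P : List (String × Int)) : String :=
  let body : List String :=
    (PySem.List.sorted (PySem.Set.ofList (P.map (fun p => p.1))) (fun k => k)).map
      (fun c => pvLine c ((P.filter (fun p => p.1 == c)).map (fun p => p.2)))
  if body.isEmpty then pvSentinel
  else PySem.Str.join "\n" (pvHeader1 :: pvHeader2 :: body)



lemma pv_min?_perm (xs ys : List Int) (h : xs.Perm ys) :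
    PySem.List.min? xs (fun v => v) = PySem.List.min? ys (fun v => v) := by
  cases hx : PySem.List.min? xs (fun v => v) with
  | none =>
      rw [PySem.List.min?_eq_none_iff] at hx
      subst hx
      rw [← h.nil_eq, show PySem.List.min? ([] : List Int) (fun v => v) = none from
        PySem.List.min?_eq_none_iff _ _ |>.mpr rfl]
  | some m =>
      cases hy : PySem.List.min? ys (fun v => v) with
      | none =>
          rw [PySem.List.min?_eq_none_iff] at hy
          subst hy
          rw [h.eq_nil, show PySem.List.min? ([] : List Int) (fun v => v) = none from
            PySem.List.min?_eq_none_iff _ _ |>.mpr rfl] at hx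
          simp at hx
      | some m' =>
          have h1 : m ≤ m' := PySem.List.min?_isMin hx m' (h.mem_iff.mpr (PySem.List.min?_mem hy))
          have h2 : m' ≤ m := PySem.List.min?_isMin hy m (h.mem_iff.mp (PySem.List.min?_mem hx))
          rw [le_antisymm h1 h2]

lemma pv_max?_perm (xs ys : List Int) (h : xs.Perm ys) :
    PySem.List.max? xs (fun v => v) = PySem.List.max? ys (fun v => v) := by
  cases hx : PySem.List.max? xs (fun v => v) with
  | none =>
      rw [PySem.List.max?_eq_none_iff] at hx
      subst hx
      rw [← h.nil_eq, show PySem.List.max? ([] : List Int) (fun v => v) = none from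
        PySem.List.max?_eq_none_iff _ _ |>.mpr rfl]
  | some m =>
      cases hy : PySem.List.max? ys (fun v => v) with
      | none =>
          rw [PySem.List.max?_eq_none_iff] at hy
          subst hy
          rw [h.eq_nil, show PySem.List.max? ([] : List Int) (fun v => v) = none from
            PySem.List.max?_eq_none_iff _ _ |>.mpr rfl] at hx
          simp at hx
      | some m' =>
          have h1 : m' ≤ m := PySem.List.max?_isMax hx m' (h.mem_iff.mpr (PySem.List.max?_mem hy))
          have h2 : m ≤ m' := PySem.List.max?_isMax hy m (h.mem_iff.mp (PySem.List.max?_mem hx))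
          rw [le_antisymm h2 h1]

lemma pv_sortedSet_perm {α : Type} [BEq α] [LawfulBEq α] [LinearOrder α]
    (xs ys : List α) (h : xs.Perm ys) :
    PySem.List.sorted (PySem.Set.ofList xs) (fun v => v) =
      PySem.List.sorted (PySem.Set.ofList ys) (fun v => v) := by
  apply PySem.List.sorted_eq_sorted_of_perm
  · exact fun a b hab => hab
  · rw [List.perm_ext_iff_of_nodup (PySem.Set.nodup_ofList xs) (PySem.Set.nodup_ofList ys)]
    intro a
    rw [PySem.Set.mem_ofList, PySem.Set.mem_ofList, h.mem_iff]

lemma pvLine_perm (c : String) (xs ys : List Int) (h : xs.Perm ys) :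
    pvLine c xs = pvLine c ys := by
  unfold pvLine
  rw [pv_min?_perm xs ys h, pv_max?_perm xs ys h, pv_sortedSet_perm xs ys h]

lemma pvRuns_sorted_eq (Q : List (String × Int)) (h : Q.Pairwise (fun a b => a.1 ≤ b.1)) :
    pvRuns Q =
      (PySem.List.sorted (PySem.Set.ofList (Q.map (fun p => p.1))) (fun k => k)).map
        (fun k => (k, (Q.filter (fun p => p.1 == k)).map (fun p => p.2))) := by
  induction Q using pvRuns.induct with
  | case1 => simp [pvRuns, PySem.List.sorted_eq_nil_iff]
  | case2 p v rest IH =>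
    have hp : ∀ z ∈ rest, p ≤ z.1 := by
      intro z hz; exact (List.pairwise_cons.mp h).1 z hz
    have hrest : rest.Pairwise (fun a b => a.1 ≤ b.1) := (List.pairwise_cons.mp h).2
    have htd : rest.takeWhile (fun q => q.1 == p) ++ rest.dropWhile (fun q => q.1 == p) = rest :=
      List.takeWhile_append_dropWhile
    have htp : ∀ z ∈ rest.takeWhile (fun q => q.1 == p), z.1 = p := by
      intro z hz; exact eq_of_beq (List.mem_takeWhile_imp (p := fun (q : String × Int) => q.1 == p) hz)
    have hdlt : ∀ z ∈ rest.dropWhile (fun q => q.1 == p), p < z.1 := by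
      cases hd : rest.dropWhile (fun q => q.1 == p) with
      | nil => intro z hz; simp at hz
      | cons w d' =>
        have hne : rest.dropWhile (fun q => q.1 == p) ≠ [] := by rw [hd]; simp
        have hw0 := List.head_dropWhile_not (fun (q : String × Int) => q.1 == p) hne
        simp only [hd] at hw0
        have hwne : w.1 ≠ p := by simpa using hw0
        have hwmem : w ∈ rest := by
          have hm : w ∈ rest.dropWhile (fun q => q.1 == p) := by
            rw [hd]; exact List.mem_cons_self
          exact (List.dropWhile_sublist _).subset hm
        have hwp : p < w.1 := lt_of_le_of_ne (hp w hwmem) (fun e => hwne e.symm)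
        have hpair : (w :: d').Pairwise (fun a b => a.1 ≤ b.1) :=
          hd ▸ (hrest.sublist (List.dropWhile_sublist _))
        intro z hz
        rcases List.mem_cons.mp hz with rfl | hz'
        · exact hwp
        · exact lt_of_lt_of_le hwp ((List.pairwise_cons.mp hpair).1 z hz')
    have hdpair : (rest.dropWhile (fun q => q.1 == p)).Pairwise (fun a b => a.1 ≤ b.1) :=
      hrest.sublist (List.dropWhile_sublist _)
    -- step1: sorted set of keys of the whole list is p :: sorted set of keys of the tail block
    have step1 :
        PySem.List.sorted (PySem.Set.ofList (((p, v) :: rest).map (fun q => q.1))) (fun k => k) =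
          p :: PySem.List.sorted
            (PySem.Set.ofList ((rest.dropWhile (fun q => q.1 == p)).map (fun q => q.1))) (fun k => k) := by
      apply PySem.List.sorted_eq_of_perm_of_pairwise_lt
      · rw [List.perm_ext_iff_of_nodup ?_ (PySem.Set.nodup_ofList _)]
        · intro a
          constructor
          · intro ha
            rcases List.mem_cons.mp ha with rfl | ha'
            · rw [PySem.Set.mem_ofList]; simp
            · rw [PySem.List.mem_sorted, PySem.Set.mem_ofList] at ha'
              rcases List.mem_map.mp ha' with ⟨z, hz, rfl⟩
              rw [PySem.Set.mem_ofList]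
              apply List.mem_map.mpr
              exact ⟨z, List.mem_cons_of_mem _ ((List.dropWhile_sublist _).subset hz), rfl⟩
          · intro ha
            rw [PySem.Set.mem_ofList] at ha
            rcases List.mem_map.mp ha with ⟨z, hz, rfl⟩
            rcases List.mem_cons.mp hz with rfl | hz'
            · exact List.mem_cons_self
            · rw [← htd] at hz'
              rcases List.mem_append.mp hz' with hz2 | hz2
              · rw [htp z hz2]; exact List.mem_cons_self
              · apply List.mem_cons_of_mem
                rw [PySem.List.mem_sorted, PySem.Set.mem_ofList]
                exact List.mem_map.mpr ⟨z, hz2, rfl⟩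
        · apply List.nodup_cons.mpr
          constructor
          · intro hmem
            rw [PySem.List.mem_sorted, PySem.Set.mem_ofList] at hmem
            rcases List.mem_map.mp hmem with ⟨z, hz, hz1⟩
            exact absurd (hz1 ▸ hdlt z hz) (lt_irrefl p)
          · exact (PySem.List.sorted_perm _ _ _).symm.nodup (PySem.Set.nodup_ofList _)
      · apply List.pairwise_cons.mpr
        constructor
        · intro a ha
          rw [PySem.List.mem_sorted, PySem.Set.mem_ofList] at ha
          rcases List.mem_map.mp ha with ⟨z, hz, rfl⟩
          exact hdlt z hz
        · exact PySem.List.sorted_ofList_pairwise_lt _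
    -- step3: the first group's values
    have step3 : ((p, v) :: rest).filter (fun q => q.1 == p) =
        (p, v) :: rest.takeWhile (fun q => q.1 == p) := by
      rw [List.filter_cons_of_pos (by simp)]
      congr 1
      conv_lhs => rw [← htd]
      rw [List.filter_append]
      rw [List.filter_eq_self.mpr (fun z hz => by simp [htp z hz]),
          List.filter_eq_nil_iff.mpr (fun z hz => by simp [(ne_of_gt (hdlt z hz))]),
          List.append_nil]
    rw [pvRuns, step1, List.map_cons, IH hdpair]
    congr 1
    · rw [step3]; rfl
    · apply List.map_congr_left
      intro k hk
      have hpk : p < k := by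
        rw [PySem.List.mem_sorted, PySem.Set.mem_ofList] at hk
        rcases List.mem_map.mp hk with ⟨z, hz, rfl⟩
        exact hdlt z hz
      have step4 : ((p, v) :: rest).filter (fun q => q.1 == k) =
          (rest.dropWhile (fun q => q.1 == p)).filter (fun q => q.1 == k) := by
        rw [List.filter_cons_of_neg (by simp [ne_of_lt hpk])]
        conv_lhs => rw [← htd]
        rw [List.filter_append,
            List.filter_eq_nil_iff.mpr (fun z hz => by simp [htp z hz, ne_of_lt hpk]),
            List.nil_append]
      rw [step4]

lemma pv_A_eq (rows : List (List (String × String))) :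
    time_left_spread_py rows = pvRender (pvPairs rows) := by
  unfold time_left_spread_py pvRender
  dsimp only
  rw [PySem.List.foldl_if_eq_foldl_filter (p := pvGuard)
      (f := fun (d : PySem.Dict String (List Int)) r => d.modify (pvPhase r) [] (fun vs => vs ++ [pvTimeLeft r]))]
  rw [show (rows.filter pvGuard).foldl
        (fun d r => d.modify (pvPhase r) [] (fun vs => vs ++ [pvTimeLeft r])) PySem.Dict.empty
      = (pvPairs rows).foldl (fun d p => d.modify p.1 [] (fun vs => vs ++ [p.2])) PySem.Dict.empty
    from by unfold pvPairs; rw [List.foldl_map]]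
  rw [PySem.List.foldl_append_singleton_eq_map]
  rw [PySem.Dict.keys_foldl_modify_key (pvPairs rows) (fun p => p.1) [] (fun _ p vs => vs ++ [p.2])]
  rw [PySem.Dict.keys_empty, PySem.Set.update_nil_left]
  have hbody : ∀ c, (((pvPairs rows).foldl
        (fun d p => d.modify p.1 [] (fun vs => vs ++ [p.2])) PySem.Dict.empty).getD c [])
      = ((pvPairs rows).filter (fun p => p.1 == c)).map (fun p => p.2) := by
    intro c
    rw [PySem.Dict.getD_foldl_modify_append, PySem.Dict.getD_empty, List.nil_append]
  simp only [hbody]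
  set body := (PySem.List.sorted (PySem.Set.ofList ((pvPairs rows).map (fun p => p.1))) (fun k => k)).map
      (fun c => pvLine c (((pvPairs rows).filter (fun p => p.1 == c)).map (fun p => p.2))) with hb
  rw [PySem.List.len_eq]
  cases body with
  | nil => simp
  | cons x xs =>
      rw [if_pos (by simp; omega), if_neg (by simp)]
      rfl


lemma pv_B_core (P : List (String × Int)) :
    (let pairs := PySem.List.sorted P (fun p => p.1)
     let body : List String := (pvRuns pairs).map (fun g => pvLine g.1 g.2)
     if body.isEmpty then pvSentinel
     else PySem.Str.join "\n" (pvHeader1 :: pvHeader2 :: body)) = pvRender P := by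
  unfold pvRender
  dsimp only
  rw [pvRuns_sorted_eq _ (PySem.List.sorted_pairwise _ _)]
  rw [List.map_map]
  have hkeys : PySem.List.sorted
        (PySem.Set.ofList ((PySem.List.sorted P (fun p => p.1)).map (fun p => p.1))) (fun k => k)
      = PySem.List.sorted (PySem.Set.ofList (P.map (fun p => p.1))) (fun k => k) :=
    pv_sortedSet_perm _ _ ((PySem.List.sorted_perm _ _ _).map _)
  have hfun : ((fun g => pvLine g.1 g.2) ∘ (fun k =>
        (k, ((PySem.List.sorted P (fun p => p.1)).filter (fun p => p.1 == k)).map (fun p => p.2))))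
      = (fun c => pvLine c ((P.filter (fun p => p.1 == c)).map (fun p => p.2))) := by
    funext k
    exact pvLine_perm k _ _ (((PySem.List.sorted_perm _ _ _).filter _).map _)
  rw [hkeys, hfun]

lemma pv_B_eq (rows : List (List (String × String))) :
    time_left_spread_py_alt rows = pvRender (pvPairs rows) := by
  unfold time_left_spread_py_alt
  rw [PySem.List.foldl_append_if pvGuard (fun r => (pvPhase r, pvTimeLeft r)), List.nil_append]
  exact pv_B_core (pvPairs rows)

-- ===== VERDICT (by name: the statement is the Claim_ definition above) =====
theorem time_left_spread_py_spec : Claim_equal_time_left_spread_py := by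
  intro rows _ _
  unfold Spec_time_left_spread_py
  rw [pv_A_eq, pv_B_eq]
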